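-- pv_equiv track=rewrite | github.com/lexibank/sabor | saborcommands/reportcluster.py | get_cogids_by_family
-- ===== SOURCE A (Python) =====
-- from collections import Counter, defaultdict
--
-- def get_cogids_by_family(table, family=None, byfam=False):
--     # Table is intermediate result from get_cogids_table_for
--     # lu refers to language unit - language or family.
--     if family:
--         # Filter on family.
--         table = [row for row in table if row[0] == family]
--     lu_idx = 0 if byfam else 1  # 0 is idx for family, 1 for language.
--     # List of languages or language families depending on lu_idx.
--     lu_unit_set = sorted(set(row[lu_idx] for row in table))
--     lu_global_cognates_gt1 = {}
--
--     # global_gt1 in [4] of table.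
--     # for each language or language family in set.
--     for lu in lu_unit_set:
--         # Get set of cross-family cogids for this language or language family.
--         cognates_gt1 = set(row[4] for row in table
--                            if row[lu_idx] == lu and row[4] != 0)
--
--         # Construct dictionary of counters for each language or language family.
--         cognates_gt1_ = {lu_: Counter() for lu_ in lu_unit_set}
--         # Process all the individual entries from the cogids table.
--         for row in table:
--             if row[4] in cognates_gt1:
--                 # Count this entry if a cross-family cogid in the list
--                 # for this language or language family.
--                 # Create count for this cogid for this language or family.
--                 # Add to count for this cogid for this language or family
--                 #   for each qualified entry.
--                 # lu_idx indexes into either the language or family column.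
--                 # *** could have just used 'lu' here!!!!
--                 cognates_gt1_[row[lu_idx]][row[4]] += 1
--
--         # Condense detail down to numbers of cross-family concepts and words,
--         # shared with each other language unit.
--         lu_global_cognates_gt1[lu] = {lu_: [len(counter), sum(counter.values())]
--                                       for lu_, counter in cognates_gt1_.items()}
--
--     return lu_global_cognates_gt1
-- ===== SOURCE B (Python) =====
-- def get_cogids_by_family(table, family=None, byfam=False):
--     if family:
--         table = [row for row in table if row[0] == family]
--     idx = 0 if byfam else 1
--     units = sorted(set(row[idx] for row in table))
--     # One grouping pass: each unit's nonzero cogids, in row order.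
--     cogs = {u: [] for u in units}
--     for row in table:
--         if row[4] != 0:
--             cogs[row[idx]].append(row[4])
--     result = {}
--     for lu in units:
--         s = set(cogs[lu])
--         inner = {}
--         for u in units:
--             shared = [c for c in cogs[u] if c in s]
--             inner[u] = [len(set(shared)), len(shared)]
--         result[lu] = inner
--     return result
-- ===== Notes on version B (the rewrite author's own statement) =====
-- stated objective: faster
-- what changed: Instead of rescanning the whole table with a fresh Counter dictionary for every language unit, B groups each unit's nonzero cogids in one pass over the table and then answers each (unit, unit) cell by filtering the per-unit cogid list against the reference unit's cogid set; the advantage grows with the number of distinct units.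
import Mathlib
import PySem

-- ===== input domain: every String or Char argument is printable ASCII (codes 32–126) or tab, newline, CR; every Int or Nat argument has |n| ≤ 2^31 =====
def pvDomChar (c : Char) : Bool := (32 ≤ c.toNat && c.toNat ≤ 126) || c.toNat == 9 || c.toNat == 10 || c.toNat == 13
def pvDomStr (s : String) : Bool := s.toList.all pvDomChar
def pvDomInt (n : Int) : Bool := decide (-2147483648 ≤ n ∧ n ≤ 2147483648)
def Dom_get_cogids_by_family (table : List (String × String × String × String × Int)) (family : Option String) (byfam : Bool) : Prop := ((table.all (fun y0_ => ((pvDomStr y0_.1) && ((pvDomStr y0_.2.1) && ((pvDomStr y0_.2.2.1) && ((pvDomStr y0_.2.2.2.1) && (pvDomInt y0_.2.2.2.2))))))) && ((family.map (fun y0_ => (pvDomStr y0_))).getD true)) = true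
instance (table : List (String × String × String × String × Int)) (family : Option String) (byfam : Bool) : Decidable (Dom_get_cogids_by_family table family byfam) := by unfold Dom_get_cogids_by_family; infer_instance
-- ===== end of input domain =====

-- B replaces A's per-unit full-table Counter rescans by one grouping pass over the table
-- (per-unit nonzero cogid lists) plus per-cell filtering of those lists; the theorems below
-- prove the two ports return equal values on every input of the domain.

-- shared source lines of A and B (family filter with Python truthiness of '', the
-- language-unit column selector, and sorted(set(...)) of that column):
def pvFilterFam (table : List (String × String × String × String × Int)) (family : Option String) : List (String × String × String × String × Int) :=
  match family with
  | some f => if f = "" then table else table.filter (fun r => r.1 == f)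
  | none => table

def pvProj (byfam : Bool) (r : String × String × String × String × Int) : String :=
  if byfam then r.1 else r.2.1

def pvUnits (t : List (String × String × String × String × Int)) (byfam : Bool) : List String :=
  PySem.List.sorted (PySem.Set.ofList (t.map (pvProj byfam))) (fun x => x) false

-- ===== PORT A =====
def get_cogids_by_family (table : List (String × String × String × String × Int)) (family : Option String) (byfam : Bool) : List (String × List (String × List Int)) :=
  let t := pvFilterFam table family
  let units := pvUnits t byfam
  (units.foldl (fun acc lu =>
      -- cognates_gt1 = set(row[4] for row in table if row[lu_idx] == lu and row[4] != 0)
      let cognates : PySem.Set Int :=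
        PySem.Set.ofList ((t.filter (fun r => pvProj byfam r == lu && r.2.2.2.2 != 0)).map (fun r => r.2.2.2.2))
      -- cognates_gt1_ = {lu_: Counter() for lu_ in lu_unit_set}
      let cnts0 : PySem.Dict String (PySem.Dict Int Int) :=
        units.foldl (fun d u => d.insert u PySem.Dict.empty) PySem.Dict.empty
      -- for row in table: if row[4] in cognates_gt1: cognates_gt1_[row[lu_idx]][row[4]] += 1
      -- (the outer key is always present, so Python's d[k] access is Dict.modify here)
      let cnts := t.foldl (fun d r =>
        if PySem.Set.contains cognates r.2.2.2.2 then
          d.modify (pvProj byfam r) PySem.Dict.empty (fun c => c.modify r.2.2.2.2 0 (· + 1))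
        else d) cnts0
      -- {lu_: [len(counter), sum(counter.values())] for lu_, counter in cognates_gt1_.items()}
      acc.insert lu ((cnts.items.foldl (fun d p =>
          d.insert p.1 [(p.2.size : Int), p.2.values.sum]) PySem.Dict.empty).items))
    PySem.Dict.empty).items

-- ===== PORT B =====
def get_cogids_by_family_alt (table : List (String × String × String × String × Int)) (family : Option String) (byfam : Bool) : List (String × List (String × List Int)) :=
  let t := pvFilterFam table family
  let units := pvUnits t byfam
  -- cogs = {u: [] for u in units}; for row in table: if row[4] != 0: cogs[row[idx]].append(row[4])
  let cogs0 : PySem.Dict String (List Int) :=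
    units.foldl (fun d u => d.insert u []) PySem.Dict.empty
  let cogs := t.foldl (fun d r =>
      if r.2.2.2.2 != 0 then d.modify (pvProj byfam r) [] (fun l => l ++ [r.2.2.2.2]) else d) cogs0
  (units.foldl (fun acc lu =>
      let s : PySem.Set Int := PySem.Set.ofList (cogs.getD lu [])
      acc.insert lu ((units.foldl (fun d u =>
          let shared := (cogs.getD u []).filter (fun c => PySem.Set.contains s c)
          d.insert u [((PySem.Set.ofList shared).length : Int), (shared.length : Int)]) PySem.Dict.empty).items))
    PySem.Dict.empty).items

-- ===== PRECONDITION & SPEC =====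
def Spec_get_cogids_by_family (table : List (String × String × String × String × Int)) (family : Option String) (byfam : Bool) (out : List (String × List (String × List Int))) : Prop := out = get_cogids_by_family_alt table family byfam
instance (table : List (String × String × String × String × Int)) (family : Option String) (byfam : Bool) (out : List (String × List (String × List Int))) : Decidable (Spec_get_cogids_by_family table family byfam out) := by unfold Spec_get_cogids_by_family; infer_instance

-- ===== CLAIM (what is proved, stated in full; the proofs are below) =====
def Claim_equal_get_cogids_by_family : Prop := ∀ (table : List (String × String × String × String × Int)) (family : Option String) (byfam : Bool), Dom_get_cogids_by_family table family byfam → Spec_get_cogids_by_family table family byfam (get_cogids_by_family table family byfam)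


-- ===== LEMMAS AND PROOFS =====

-- the canonical value both ports are reduced to
def pvSetA (t : List (String × String × String × String × Int)) (byfam : Bool) (lu : String) : PySem.Set Int :=
  PySem.Set.ofList ((t.filter (fun r => pvProj byfam r == lu && r.2.2.2.2 != 0)).map (fun r => r.2.2.2.2))

def pvCell (t : List (String × String × String × String × Int)) (byfam : Bool) (lu u : String) : List Int :=
  ((t.filter (fun r => PySem.Set.contains (pvSetA t byfam lu) r.2.2.2.2)).filter (fun r => pvProj byfam r == u)).map (fun r => r.2.2.2.2)

def pvCanon (table : List (String × String × String × String × Int)) (family : Option String) (byfam : Bool) : List (String × List (String × List Int)) :=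
  let t := pvFilterFam table family
  let units := pvUnits t byfam
  units.map (fun lu => (lu, units.map (fun u => (u,
    [((PySem.Set.ofList (pvCell t byfam lu u)).length : Int), ((pvCell t byfam lu u).length : Int)]))))

-- a grouping fold over Dict.modify, read back at one key
theorem pv_getD_foldl_modify {B K V : Type} [BEq K] [LawfulBEq K] [DecidableEq K]
    (l : List B) (key : B → K) (f : B → V → V) (d0 : V) (u : K) :
    forall d : PySem.Dict K V,
      (l.foldl (fun d r => (d.modify (key r) d0 (f r))) d).getD u d0
        = (l.filter (fun r => key r == u)).foldl (fun v r => f r v) (d.getD u d0) := by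
  induction l with
  | nil => intro d; simp
  | cons r l ih =>
      intro d
      simp only [List.foldl_cons, List.filter_cons]
      rw [ih]
      by_cases h : key r = u
      · simp [h]
      · simp [h, PySem.Dict.getD_modify, Ne.symm h]

theorem pv_update_self {A : Type} [BEq A] [LawfulBEq A] (s : PySem.Set A) (xs : List A)
    (h : forall x, x ∈ xs → x ∈ s) : PySem.Set.update s xs = s := by
  rw [PySem.Set.update_eq_append_filter]
  have he : (PySem.Set.ofList xs).filter (fun y => !PySem.Set.contains s y) = [] := by
    rw [List.filter_eq_nil_iff]
    intro a ha
    simp [h a ((PySem.Set.mem_ofList xs a).mp ha)]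
  rw [he]
  simp

-- {k: v(k) for k in l} built by foldl-insert from empty
theorem pv_items_comprehension {K V : Type} [BEq K] [LawfulBEq K] (l : List K) (v : K → V) (h : l.Nodup) :
    (l.foldl (fun d u => d.insert u (v u)) PySem.Dict.empty).items = l.map (fun u => (u, v u)) := by
  have := PySem.Dict.items_foldl_insert_fresh l (fun a => a) v PySem.Dict.empty
    (by intro a _; exact PySem.Dict.contains_empty a) (by simpa using h)
  simpa using this

theorem pv_keys_comprehension {K V : Type} [BEq K] [LawfulBEq K] (l : List K) (v : K → V) (h : l.Nodup) :
    (l.foldl (fun d u => d.insert u (v u)) PySem.Dict.empty).keys = l := by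
  simp [PySem.Dict.keys, pv_items_comprehension l v h, Function.comp_def]

theorem pv_getD_comprehension {K V : Type} [BEq K] [LawfulBEq K] (l : List K) (v : K → V) (h : l.Nodup)
    (u : K) (hu : u ∈ l) (d0 : V) :
    (l.foldl (fun d u => d.insert u (v u)) PySem.Dict.empty).getD u d0 = v u := by
  apply PySem.Dict.getD_of_mem_items
  · rw [pv_items_comprehension l v h]; exact List.mem_map_of_mem hu
  · rw [pv_keys_comprehension l v h]; exact h

theorem pv_nodup_units (t : List (String × String × String × String × Int)) (byfam : Bool) :
    (pvUnits t byfam).Nodup := by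
  have hp := PySem.List.sorted_perm (PySem.Set.ofList (t.map (pvProj byfam))) (fun x => x) false
  exact hp.symm.nodup (PySem.Set.nodup_ofList _)

theorem pv_mem_units (t : List (String × String × String × String × Int)) (byfam : Bool)
    (r : String × String × String × String × Int) (hr : r ∈ t) : pvProj byfam r ∈ pvUnits t byfam := by
  rw [pvUnits, PySem.List.mem_sorted, PySem.Set.mem_ofList]
  exact List.mem_map_of_mem hr

theorem pv_sum_counts {A : Type} [BEq A] [LawfulBEq A] (xs : List A) :
    ∀ s : List A, s.Nodup → (∀ k ∈ xs, k ∈ s) →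
      (s.map (fun k => (xs.count k : Int))).sum = (xs.length : Int) := by
  induction xs with
  | nil => intro s _ _; simp
  | cons x xs ih =>
      intro s hs hsub
      have h1 : (s.map (fun k => ((x :: xs).count k : Int))).sum
          = (s.map (fun k => ((xs.count k : Int) + (if (x == k) then (1 : Int) else 0)))).sum := by
        apply congrArg
        apply List.map_congr_left
        intro k _
        rw [List.count_cons]
        push_cast
        rfl
      rw [h1, PySem.List.sum_map_add_int, ih s hs (fun k hk => hsub k (List.mem_cons_of_mem _ hk))]
      have h2 : (s.map (fun k => if (x == k) then (1 : Int) else 0)).sum = 1 := by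
        rw [PySem.List.sum_map_ite_one_zero]
        have h3 : s.countP (fun k => x == k) = s.count x := by
          unfold List.count
          apply List.countP_congr
          intro k _
          simp [beq_iff_eq]
          exact eq_comm
        rw [h3, List.count_eq_one_of_mem hs (hsub x List.mem_cons_self)]
        rfl
      rw [h2]
      simp

theorem pv_A_char (table : List (String × String × String × String × Int)) (family : Option String) (byfam : Bool) :
    get_cogids_by_family table family byfam = pvCanon table family byfam := by
  simp only [get_cogids_by_family, pvCanon, pvCell, pvSetA]
  set t := pvFilterFam table family with ht
  set units := pvUnits t byfam with hu
  have hnU : units.Nodup := pv_nodup_units t byfam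
  have hmem := pv_mem_units t byfam
  rw [pv_items_comprehension units _ hnU]
  apply List.map_congr_left
  intro lu hlu
  apply congrArg (Prod.mk lu)
  rw [← List.foldl_filter]
  set S := PySem.Set.ofList ((List.filter (fun r => pvProj byfam r == lu && r.2.2.2.2 != 0) t).map (fun r => r.2.2.2.2)) with hS
  set rows := List.filter (fun r => S.contains r.2.2.2.2) t with hrows
  set cnts := rows.foldl (fun d r => d.modify (pvProj byfam r) PySem.Dict.empty (fun c => c.modify r.2.2.2.2 (0 : Int) (fun x => x + 1))) (units.foldl (fun d u => d.insert u (PySem.Dict.empty : PySem.Dict Int Int)) PySem.Dict.empty) with hcnts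
  have hkeys : cnts.keys = units := by
    rw [hcnts, PySem.Dict.keys_foldl_modify_key rows (fun r => pvProj byfam r) PySem.Dict.empty (fun _ r c => c.modify r.2.2.2.2 (0 : Int) (fun x => x + 1))]
    rw [pv_keys_comprehension units _ hnU]
    apply pv_update_self
    intro x hx
    obtain ⟨r, hr, rfl⟩ := List.mem_map.mp hx
    rw [hu]
    exact hmem r (List.mem_filter.mp hr).1
  have hnk : cnts.keys.Nodup := by rw [hkeys]; exact hnU
  have hitems : cnts.items = units.map (fun u => (u, cnts.getD u PySem.Dict.empty)) := by
    rw [PySem.Dict.items_eq_map_keys cnts hnk PySem.Dict.empty, hkeys]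
  have hmk : (cnts.items.map (fun p => p.1)).Nodup := hnk
  rw [PySem.Dict.items_foldl_insert_fresh cnts.items (fun p => p.1) (fun p : String × PySem.Dict Int Int => [(p.2.size : Int), p.2.values.sum]) PySem.Dict.empty (fun a _ => PySem.Dict.contains_empty _) hmk]
  rw [hitems, List.map_map]
  have hie : (PySem.Dict.empty : PySem.Dict String (List Int)).items = [] := rfl
  rw [hie, List.nil_append]
  simp only [Function.comp_def]
  apply List.map_congr_left
  intro u huu
  apply congrArg (Prod.mk u)
  have hgd : cnts.getD u PySem.Dict.empty
      = PySem.Dict.counter ((rows.filter (fun r => pvProj byfam r == u)).map (fun r => r.2.2.2.2)) := by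
    rw [hcnts, pv_getD_foldl_modify rows (fun r => pvProj byfam r)
      (fun r (c : PySem.Dict Int Int) => c.modify r.2.2.2.2 (0 : Int) (fun x => x + 1)) PySem.Dict.empty u]
    rw [pv_getD_comprehension units _ hnU u huu]
    rw [PySem.Dict.counter_eq_foldl, List.foldl_map]
  rw [hgd]
  set xs := (rows.filter (fun r => pvProj byfam r == u)).map (fun r => r.2.2.2.2) with hxs
  have hsize : (PySem.Dict.counter xs).size = (PySem.Set.ofList xs).length := by
    simp [PySem.Dict.size, PySem.Dict.items_counter]
  have hsum : (PySem.Dict.counter xs).values.sum = (xs.length : Int) := by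
    simp only [PySem.Dict.values, PySem.Dict.items_counter, List.map_map, Function.comp_def]
    exact pv_sum_counts xs (PySem.Set.ofList xs) (PySem.Set.nodup_ofList xs)
      (fun k hk => (PySem.Set.mem_ofList xs k).mpr hk)
  rw [hsize, hsum]

theorem pv_B_char (table : List (String × String × String × String × Int)) (family : Option String) (byfam : Bool) :
    get_cogids_by_family_alt table family byfam = pvCanon table family byfam := by
  simp only [get_cogids_by_family_alt, pvCanon, pvCell, pvSetA]
  set t := pvFilterFam table family with ht
  set units := pvUnits t byfam with hu
  have hnU : units.Nodup := pv_nodup_units t byfam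
  have hmem := pv_mem_units t byfam
  rw [← List.foldl_filter]
  have hg : ∀ u ∈ units,
      ((t.filter (fun r => r.2.2.2.2 != 0)).foldl
          (fun d r => d.modify (pvProj byfam r) [] (fun l => l ++ [r.2.2.2.2]))
          (units.foldl (fun d u => d.insert u ([] : List Int)) PySem.Dict.empty)).getD u []
        = ((t.filter (fun r => r.2.2.2.2 != 0)).filter (fun r => pvProj byfam r == u)).map (fun r => r.2.2.2.2) := by
    intro u huu
    rw [pv_getD_foldl_modify]
    rw [pv_getD_comprehension units _ hnU u huu]
    rw [PySem.List.foldl_append_singleton_eq_map]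
    simp
  rw [pv_items_comprehension units _ hnU]
  apply List.map_congr_left
  intro lu hlu
  apply congrArg (Prod.mk lu)
  rw [pv_items_comprehension units _ hnU]
  apply List.map_congr_left
  intro u huu
  apply congrArg (Prod.mk u)
  rw [hg lu hlu, hg u huu]
  simp only [List.filter_filter, List.filter_map, Function.comp_def]
  set S := PySem.Set.ofList ((List.filter (fun a => pvProj byfam a == lu && a.2.2.2.2 != 0) t).map (fun r => r.2.2.2.2)) with hS
  have hz : ∀ c : Int, S.contains c = true → (c != 0) = true := by
    intro c hc
    rw [hS, PySem.Set.contains_iff, PySem.Set.mem_ofList] at hc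
    obtain ⟨r, hr, rfl⟩ := List.mem_map.mp hc
    have h2 := (List.mem_filter.mp hr).2
    simp only [Bool.and_eq_true] at h2
    exact h2.2
  have hfe : List.filter (fun a => S.contains a.2.2.2.2 && (pvProj byfam a == u && a.2.2.2.2 != 0)) t
      = List.filter (fun a => pvProj byfam a == u && S.contains a.2.2.2.2) t := by
    apply List.filter_congr
    intro r _
    by_cases h1 : S.contains r.2.2.2.2 = true
    · rw [h1, hz _ h1]
      simp
    · rw [Bool.not_eq_true] at h1
      rw [h1]
      simp
  rw [hfe]

-- ===== VERDICT (by name: the statement is the Claim_ definition above) =====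
theorem get_cogids_by_family_spec : Claim_equal_get_cogids_by_family := by
  intro table family byfam _
  unfold Spec_get_cogids_by_family
  rw [pv_A_char, pv_B_char]
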